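-- pv_equiv track=rewrite | github.com/postgrespro/testgres | testgres/operations/remote_ops.py | _quote_envvar
-- ===== SOURCE A (Python) =====
-- def _quote_envvar(value: str) -> str:
--     assert type(value) == str  # noqa: E721
--     result = "\""
--     for ch in value:
--         if ch == "\"":
--             result += "\\\""
--         elif ch == "\\":
--             result += "\\\\"
--         else:
--             result += ch
--     result += "\""
--     return result
-- ===== SOURCE B (Python) =====
-- def _quote_envvar(value: str) -> str:
--     assert type(value) == str  # noqa: E721
--     return '"' + value.replace('\\', '\\\\').replace('"', '\\"') + '"'
-- ===== Notes on version B (the rewrite author's own statement) =====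
-- stated objective: faster
-- what changed: Replaced the per-character classification loop with string concatenation by two bulk str.replace passes (backslashes doubled first, then quotes escaped), with no explicit accumulator.
import Mathlib
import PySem

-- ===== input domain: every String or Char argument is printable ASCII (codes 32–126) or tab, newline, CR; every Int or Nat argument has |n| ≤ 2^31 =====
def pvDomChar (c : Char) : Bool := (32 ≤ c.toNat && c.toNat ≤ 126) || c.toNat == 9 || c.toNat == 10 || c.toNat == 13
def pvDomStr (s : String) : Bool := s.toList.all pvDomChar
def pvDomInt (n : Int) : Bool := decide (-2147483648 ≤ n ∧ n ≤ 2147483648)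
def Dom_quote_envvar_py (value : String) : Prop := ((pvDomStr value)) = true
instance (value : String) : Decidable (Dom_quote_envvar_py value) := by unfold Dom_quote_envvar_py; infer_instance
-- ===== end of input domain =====

-- B replaces A's per-character classification loop by two bulk str.replace passes
-- (double backslashes first, then escape quotes); objective: idiomatic. Return value only.

-- ===== PORT A =====
-- the for-loop over the characters with the growing result string, as a foldl over List Char
def quote_envvar_py (value : String) : String :=
  String.ofList
    ((value.toList.foldl
      (fun result ch =>
        if ch = '"' then result ++ ['\\', '"']
        else if ch = '\\' then result ++ ['\\', '\\']
        else result ++ [ch])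
      ['"']) ++ ['"'])

-- ===== PORT B =====
def quote_envvar_py_alt (value : String) : String :=
  "\"" ++ PySem.Str.replace (PySem.Str.replace value "\\" "\\\\") "\"" "\\\"" ++ "\""

-- ===== PRECONDITION & SPEC =====
def Spec_quote_envvar_py (value : String) (out : String) : Prop := out = quote_envvar_py_alt value
instance (value : String) (out : String) : Decidable (Spec_quote_envvar_py value out) := by unfold Spec_quote_envvar_py; infer_instance

-- ===== CLAIM (what is proved, stated in full; the proofs are below) =====
def Claim_equal_quote_envvar_py : Prop := ∀ (value : String), Dom_quote_envvar_py value → Spec_quote_envvar_py value (quote_envvar_py value)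

-- ===== LEMMAS AND PROOFS =====

-- replace.go with a single-character needle is a flatMap over the characters
theorem replace_go_single (c : Char) (new : List Char) (l : List Char) :
    ∀ (fuel : Nat) (acc : List Char), l.length ≤ fuel →
    PySem.Chars.replace.go [c] new fuel l acc
      = acc.reverse ++ l.flatMap (fun x => if x = c then new else [x]) := by
  induction l with
  | nil =>
    intro fuel acc _
    cases fuel <;> simp [PySem.Chars.replace.go]
  | cons x t ih =>
    intro fuel acc h
    cases fuel with
    | zero => simp at h
    | succ f =>
      have hf : t.length ≤ f := by
        simp only [List.length_cons] at h; omega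
      by_cases hx : x = c
      · subst hx
        rw [PySem.Chars.replace.go]
        simp only [List.isPrefixOf, BEq.rfl, Bool.true_and,
          if_true, List.length_cons, List.length_nil, List.drop_succ_cons, List.drop_zero]
        rw [ih f (new.reverse ++ acc) hf]
        simp
      · rw [PySem.Chars.replace.go]
        have hpre : [c].isPrefixOf (x :: t) = false := by
          simp only [List.isPrefixOf, Bool.and_true]
          exact beq_eq_false_iff_ne.mpr (fun hcx => hx hcx.symm)
        rw [hpre]
        simp only [Bool.false_eq_true, if_false]
        rw [ih f (x :: acc) hf]
        simp [hx]

-- Python s.replace(old, new) for a one-character old, characterised as a flatMap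
theorem replace_single (s : List Char) (c : Char) (new : List Char) :
    PySem.Chars.replace s [c] new = s.flatMap (fun x => if x = c then new else [x]) := by
  unfold PySem.Chars.replace
  simp only [List.isEmpty_cons, Bool.false_eq_true, if_false]
  simpa using replace_go_single c new s s.length [] (le_refl _)

-- the encoding A's loop body appends for one character
def pvEnc (ch : Char) : List Char :=
  if ch = '"' then ['\\', '"'] else if ch = '\\' then ['\\', '\\'] else [ch]

theorem foldl_enc (l : List Char) (init : List Char) :
    l.foldl
      (fun result ch =>
        if ch = '"' then result ++ ['\\', '"']
        else if ch = '\\' then result ++ ['\\', '\\']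
        else result ++ [ch]) init
      = init ++ l.flatMap pvEnc := by
  induction l generalizing init with
  | nil => simp
  | cons x t ih =>
    simp only [List.foldl_cons, List.flatMap_cons]
    rw [ih]
    unfold pvEnc
    split_ifs <;> simp

-- A's encoding is the composition of B's two single-character replacements
theorem enc_eq_comp : pvEnc = fun x =>
    ((if x = '\\' then ['\\', '\\'] else [x]).flatMap
      (fun y => if y = '"' then ['\\', '"'] else [y])) := by
  funext x
  unfold pvEnc
  by_cases hq : x = '"'
  · subst hq; simp
  · by_cases hb : x = '\\'
    · subst hb; simp
    · simp [hq, hb]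

-- ===== VERDICT (by name: the statement is the Claim_ definition above) =====
theorem quote_envvar_py_spec : Claim_equal_quote_envvar_py := by
  intro value _
  unfold Spec_quote_envvar_py quote_envvar_py quote_envvar_py_alt
  apply String.ext
  have hq : ("\"" : String).toList = ['"'] := by decide
  have hbs : ("\\" : String).toList = ['\\'] := by decide
  have hbb : ("\\\\" : String).toList = ['\\', '\\'] := by decide
  have hbq : ("\\\"" : String).toList = ['\\', '"'] := by decide
  rw [String.toList_append, String.toList_append, PySem.Str.toList_replace,
    PySem.Str.toList_replace, hq, hbs, hbb, hbq, String.toList_ofList, foldl_enc,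
    replace_single, replace_single, List.flatMap_assoc, enc_eq_comp]
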